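-- pv_equiv track=rewrite | github.com/nadeemlab/DeepLIIF | deepliif/postprocessing.py | make_full_contour
-- ===== SOURCE A (Python) =====
-- def make_full_contour(points):
--     """
--     Convert a simplified contour to a complete pixel-by-pixel contour
--     (i.e., every point is an 8-neighbor of the previous point).  It is
--     assumed that vectors between points are all one of the eight pixel
--     neighbor directions.  The input parameter of contour points must
--     contain at least one point.
--
--     Parameters
--     ----------
--     points : list
--         Contour of boundary points (x, y).
--
--     Returns
--     -------
--     list :
--         Full contour of boundary points (x, y).
--     """
--
--     # start with first point
--     full = [(points[0][0], points[0][1])]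
--
--     # for all remaining points:
--     for i in range(1, len(points)):
--
--         # calculate direction from last full point to current input point
--         dx = points[i][0] - full[-1][0]
--         dy = points[i][1] - full[-1][1]
--         dx = 1 if dx > 0 else (-1 if dx < 0 else 0)
--         dy = 1 if dy > 0 else (-1 if dy < 0 else 0)
--
--         # add direction to last full point until reach current input point
--         while full[-1][0] != points[i][0] or full[-1][1] != points[i][1]:
--             full.append((full[-1][0] + dx, full[-1][1] + dy))
--
--     # calculate direction from last full point until first point
--     dx = full[0][0] - full[-1][0]
--     dy = full[0][1] - full[-1][1]
--     dx = 1 if dx > 0 else (-1 if dx < 0 else 0)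
--     dy = 1 if dy > 0 else (-1 if dy < 0 else 0)
--
--     # add direction to last full point until reach first point (avoid duplicate)
--     while full[-1][0] + dx != full[0][0] or full[-1][1] + dy != full[0][1]:
--         full.append((full[-1][0] + dx, full[-1][1] + dy))
--
--     return full
-- ===== SOURCE B (Python) =====
-- def make_full_contour(points):
--     # Uniform cyclic decomposition: each edge (p, q) -- including the closing
--     # wrap edge -- contributes a half-open run of pixels [p, q) generated by
--     # exact linear interpolation p + k*(q-p)//n, n = Chebyshev length.
--     full = []
--     for (x0, y0), (x1, y1) in zip(points, points[1:] + points[:1]):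
--         n = max(abs(x1 - x0), abs(y1 - y0))
--         full.extend((x0 + k * (x1 - x0) // n, y0 + k * (y1 - y0) // n)
--                     for k in range(n))
--     return full or [(points[0][0], points[0][1])]
-- ===== Notes on version B (the rewrite author's own statement) =====
-- stated objective: alternative
-- what changed: B drops A's seeded pixel-stepping while loops (advance a mutable last point by a sign vector until each target is hit, with a special stop-one-short closing loop) for a uniform cyclic decomposition: every edge, including the closing wrap, contributes a half-open run of pixels computed by exact linear interpolation p + k*(q-p)//n over the edge's Chebyshev length n, with no sign vectors, no stepping state and no special-cased wrap.
-- intended difference: On contours whose last point equals the first (but whose points are not all identical), A appends the first point a second time when closing the loop - a duplicate its own comment says it avoids - while B returns the contour without that duplicate, the intended closed-contour output. — e.g. on make_full_contour([(0, 0), (1, 0), (0, 0)]): A returns [(0, 0), (1, 0), (0, 0)], B returns [(0, 0), (1, 0)]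
import Mathlib
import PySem

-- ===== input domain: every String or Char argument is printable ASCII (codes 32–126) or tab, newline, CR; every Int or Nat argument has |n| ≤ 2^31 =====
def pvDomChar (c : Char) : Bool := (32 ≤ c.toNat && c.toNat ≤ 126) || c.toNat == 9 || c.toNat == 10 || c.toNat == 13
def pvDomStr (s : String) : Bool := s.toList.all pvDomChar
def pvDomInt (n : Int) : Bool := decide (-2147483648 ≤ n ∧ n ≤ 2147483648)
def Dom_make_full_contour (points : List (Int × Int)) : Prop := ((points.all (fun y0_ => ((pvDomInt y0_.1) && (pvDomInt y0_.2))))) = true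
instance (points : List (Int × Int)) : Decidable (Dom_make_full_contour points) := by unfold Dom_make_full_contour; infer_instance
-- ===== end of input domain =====

-- B replaces A's seeded pixel-stepping while loops by a uniform cyclic decomposition:
-- every edge (including the closing wrap) contributes a half-open pixel run generated by
-- exact linear interpolation p + k*(q-p)//n; objective: alternative decomposition, same cost.
-- On pre-closed contours (last point = first point, not all points equal) A emits the first
-- point twice at the close; B omits the duplicate (stated as an intended difference D_ below).

-- ===== PORT A =====
-- 'dx = 1 if dx > 0 else (-1 if dx < 0 else 0)'
def pvSgn (v : Int) : Int := if v > 0 then 1 else if v < 0 then -1 else 0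

-- fuel bound for A's while loops: the Manhattan distance (+1 at the call site);
-- on every input admitted by Pre_ the loop stops before the fuel runs out, so
-- the port computes exactly what A computes there.
def pvFuel (t s : Int × Int) : Nat := (t.1 - s.1).natAbs + (t.2 - s.2).natAbs

-- 'while full[-1][0] != points[i][0] or full[-1][1] != points[i][1]: full.append(last+d)'
-- returns (appended points, last point after the loop)
def pvWhileA (t d : Int × Int) : Nat → (Int × Int) → List (Int × Int) × (Int × Int)
  | 0, c => ([], c)
  | f + 1, c =>
    if c = t then ([], c)
    else
      match pvWhileA t d f (c.1 + d.1, c.2 + d.2) with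
      | (l, last) => ((c.1 + d.1, c.2 + d.2) :: l, last)

-- 'for i in range(1, len(points)):' — walks the remaining points, threading the last full point
def pvSegsA : List (Int × Int) → (Int × Int) → List (Int × Int) × (Int × Int)
  | [], c => ([], c)
  | p :: rest, c =>
    match pvWhileA p (pvSgn (p.1 - c.1), pvSgn (p.2 - c.2)) (pvFuel p c + 1) c with
    | (seg, last) =>
      match pvSegsA rest last with
      | (tailseg, fin) => (seg ++ tailseg, fin)

-- 'while full[-1][0] + dx != full[0][0] or full[-1][1] + dy != full[0][1]: full.append(last+d)'
def pvWhileB (t d : Int × Int) : Nat → (Int × Int) → List (Int × Int)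
  | 0, _ => []
  | f + 1, c =>
    if (c.1 + d.1, c.2 + d.2) = t then []
    else (c.1 + d.1, c.2 + d.2) :: pvWhileB t d f (c.1 + d.1, c.2 + d.2)

def make_full_contour (points : List (Int × Int)) : List (Int × Int) :=
  match points with
  | [] => []   -- Python raises IndexError here; excluded by Pre_
  | p0 :: rest =>
    match pvSegsA rest p0 with
    | (body, last) =>
      (p0 :: body) ++
        pvWhileB p0 (pvSgn (p0.1 - last.1), pvSgn (p0.2 - last.2)) (pvFuel p0 last + 1) last

-- ===== PORT B =====
-- one edge's half-open pixel run [p, q): n = max(abs(dx), abs(dy)),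
-- '(x0 + k*(x1-x0)//n, y0 + k*(y1-y0)//n) for k in range(n)'
def pvLerpSeg (p q : Int × Int) : List (Int × Int) :=
  (PySem.List.pyRange 0 ((max (q.1 - p.1).natAbs (q.2 - p.2).natAbs : Nat) : Int) 1).map
    (fun k => (p.1 + PySem.Int.floordiv (k * (q.1 - p.1)) ((max (q.1 - p.1).natAbs (q.2 - p.2).natAbs : Nat) : Int),
               p.2 + PySem.Int.floordiv (k * (q.2 - p.2)) ((max (q.1 - p.1).natAbs (q.2 - p.2).natAbs : Nat) : Int)))

def make_full_contour_alt (points : List (Int × Int)) : List (Int × Int) :=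
  match points with
  | [] => []   -- Python raises IndexError here; excluded by Pre_
  | p0 :: rest =>
    -- 'zip(points, points[1:] + points[:1])', then 'full.extend(...)' per edge
    let full := ((p0 :: rest).zip (rest ++ [p0])).foldl
      (fun acc pq => acc ++ pvLerpSeg pq.1 pq.2) []
    -- 'return full or [(points[0][0], points[0][1])]'
    if full = [] then [(p0.1, p0.2)] else full

-- ===== PRECONDITION & SPEC =====
-- the segment assumption A's docstring states: the vector between consecutive points is
-- one of the eight pixel-neighbour directions (axis-aligned or exactly diagonal)
def pvAligned (a b : Int × Int) : Prop :=
  b.1 - a.1 = 0 ∨ b.2 - a.2 = 0 ∨ (b.1 - a.1).natAbs = (b.2 - a.2).natAbs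

-- Pre_ excludes the empty list (A raises IndexError) and contours with a non-aligned
-- consecutive or wrap-around segment, on which A's while loop never terminates.
def Pre_make_full_contour (points : List (Int × Int)) : Prop :=
  points ≠ [] ∧ (∀ pq ∈ points.zip points.tail, pvAligned pq.1 pq.2) ∧
    pvAligned (points.getLastD (0, 0)) (points.headD (0, 0))

instance (points : List (Int × Int)) : Decidable (Pre_make_full_contour points) := by
  unfold Pre_make_full_contour pvAligned; infer_instance

def pvWitness_make_full_contour : (List (Int × Int)) := [(0, 0), (2, 0), (2, 2), (0, 2)]

-- On contours whose last point equals the first (but whose points are not all identical),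
-- A appends the first point a second time when closing the loop — a duplicate its own
-- comment says it avoids — while B returns the contour without that duplicate, the
-- intended closed-contour output.
def D_make_full_contour (points : List (Int × Int)) : Prop :=
  points.getLastD (0, 0) = points.headD (0, 0) ∧
    ¬ (∀ p ∈ points, p = points.headD (0, 0))

instance (points : List (Int × Int)) : Decidable (D_make_full_contour points) := by
  unfold D_make_full_contour; infer_instance

def Spec_make_full_contour (points : List (Int × Int)) (out : List (Int × Int)) : Prop := ¬ D_make_full_contour points → out = make_full_contour_alt points
instance (points : List (Int × Int)) (out : List (Int × Int)) : Decidable (Spec_make_full_contour points out) := by unfold Spec_make_full_contour; infer_instance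

def pvDiffWitness_make_full_contour : (List (Int × Int)) := [(0, 0), (1, 0), (0, 0)]

def pvDiffWitnessOut_make_full_contour : (List (Int × Int)) × (List (Int × Int)) :=
  ([(0, 0), (1, 0), (0, 0)], [(0, 0), (1, 0)])

-- ===== CLAIM (what is proved, stated in full; the proofs are below) =====
def Claim_unchanged_make_full_contour : Prop := ∀ (points : List (Int × Int)), Dom_make_full_contour points → Pre_make_full_contour points → Spec_make_full_contour points (make_full_contour points)

def Claim_changed_make_full_contour : Prop := Dom_make_full_contour (pvDiffWitness_make_full_contour) ∧ Pre_make_full_contour (pvDiffWitness_make_full_contour) ∧ D_make_full_contour (pvDiffWitness_make_full_contour) ∧ make_full_contour (pvDiffWitness_make_full_contour) = pvDiffWitnessOut_make_full_contour.1 ∧ make_full_contour_alt (pvDiffWitness_make_full_contour) = pvDiffWitnessOut_make_full_contour.2 ∧ pvDiffWitnessOut_make_full_contour.1 ≠ pvDiffWitnessOut_make_full_contour.2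

def Claim_exact_make_full_contour : Prop := ∀ (points : List (Int × Int)), Dom_make_full_contour points → Pre_make_full_contour points → D_make_full_contour points → make_full_contour points ≠ make_full_contour_alt points

-- ===== LEMMAS AND PROOFS =====

theorem pvSgn_eq_zero_iff (v : Int) : pvSgn v = 0 ↔ v = 0 := by
  unfold pvSgn; split_ifs <;> simp <;> omega

theorem pvSgn_mul_natAbs (v : Int) : (v.natAbs : Int) * pvSgn v = v := by
  unfold pvSgn; split_ifs <;> omega

-- an aligned segment written as start + c • sign-direction, c the Chebyshev length
theorem pvAligned_decomp {a b : Int × Int} (h : pvAligned a b) :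
    b = (a.1 + ((max (b.1 - a.1).natAbs (b.2 - a.2).natAbs : Nat) : Int) * pvSgn (b.1 - a.1),
         a.2 + ((max (b.1 - a.1).natAbs (b.2 - a.2).natAbs : Nat) : Int) * pvSgn (b.2 - a.2)) := by
  obtain ⟨x, y⟩ := a; obtain ⟨u, v⟩ := b
  have h1 := pvSgn_mul_natAbs (u - x)
  have h2 := pvSgn_mul_natAbs (v - y)
  simp only [Prod.mk.injEq]
  rcases h with h | h | h
  · constructor
    · have hz : pvSgn (u - x) = 0 := by rw [pvSgn_eq_zero_iff]; exact h
      rw [hz]; omega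
    · have hm : max (u - x).natAbs (v - y).natAbs = (v - y).natAbs := by omega
      rw [hm]; omega
  · constructor
    · have hm : max (u - x).natAbs (v - y).natAbs = (u - x).natAbs := by omega
      rw [hm]; omega
    · have hz : pvSgn (v - y) = 0 := by rw [pvSgn_eq_zero_iff]; exact h
      rw [hz]; omega
  · constructor
    · have hm : max (u - x).natAbs (v - y).natAbs = (u - x).natAbs := by omega
      rw [hm]; omega
    · have hm : max (u - x).natAbs (v - y).natAbs = (v - y).natAbs := by omega
      rw [hm]; omega

-- A's inner while loop, in closed form, for a segment of Chebyshev length c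
theorem pvWhileA_closed (d : Int × Int) (c : Nat) :
    ∀ (f : Nat) (s : Int × Int), c ≤ f → (c ≠ 0 → d ≠ (0, 0)) →
    pvWhileA (s.1 + (c : Int) * d.1, s.2 + (c : Int) * d.2) d f s =
      ((List.range c).map (fun (k : Nat) => (s.1 + ((k : Int) + 1) * d.1, s.2 + ((k : Int) + 1) * d.2)),
       (s.1 + (c : Int) * d.1, s.2 + (c : Int) * d.2)) := by
  induction c with
  | zero =>
    intro f s _ _
    cases f with
    | zero => simp [pvWhileA]
    | succ f => simp [pvWhileA]
  | succ c ih =>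
    intro f s hf hd
    obtain ⟨f, rfl⟩ : ∃ f', f = f' + 1 := ⟨f - 1, by omega⟩
    have hdne : d ≠ (0, 0) := hd (Nat.succ_ne_zero c)
    have hne : s ≠ (s.1 + ((c + 1 : Nat) : Int) * d.1, s.2 + ((c + 1 : Nat) : Int) * d.2) := by
      intro hEq
      have h1 : s.1 = s.1 + ((c + 1 : Nat) : Int) * d.1 := congrArg Prod.fst hEq
      have h2 : s.2 = s.2 + ((c + 1 : Nat) : Int) * d.2 := congrArg Prod.snd hEq
      have hd1 : d.1 = 0 := by
        by_contra hd1
        have hpos : ((c + 1 : Nat) : Int) * d.1 ≠ 0 := mul_ne_zero (by positivity) hd1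
        omega
      have hd2 : d.2 = 0 := by
        by_contra hd2
        have hpos : ((c + 1 : Nat) : Int) * d.2 ≠ 0 := mul_ne_zero (by positivity) hd2
        omega
      exact hdne (Prod.ext hd1 hd2)
    have step := ih f (s.1 + d.1, s.2 + d.2) (by omega) (fun _ => hdne)
    simp only [pvWhileA]
    rw [if_neg hne]
    have harg1 : s.1 + ((c + 1 : Nat) : Int) * d.1 = (s.1 + d.1) + (c : Int) * d.1 := by
      push_cast; ring
    have harg2 : s.2 + ((c + 1 : Nat) : Int) * d.2 = (s.2 + d.2) + (c : Int) * d.2 := by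
      push_cast; ring
    rw [harg1, harg2, step]
    congr 1
    rw [List.range_succ_eq_map, List.map_cons, List.map_map]
    refine congrArg₂ List.cons (by norm_num) (List.map_congr_left fun k _ => ?_)
    simp only [Function.comp_apply, Prod.mk.injEq]
    refine ⟨by push_cast; ring, by push_cast; ring⟩

-- A's closing while loop, closed form, one step short of the target
theorem pvWhileB_closed (d : Int × Int) (m : Nat) :
    ∀ (f : Nat) (s : Int × Int), m ≤ f → d ≠ (0, 0) →
    pvWhileB (s.1 + ((m : Int) + 1) * d.1, s.2 + ((m : Int) + 1) * d.2) d f s =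
      (List.range m).map (fun (k : Nat) => (s.1 + ((k : Int) + 1) * d.1, s.2 + ((k : Int) + 1) * d.2)) := by
  induction m with
  | zero =>
    intro f s _ _
    cases f with
    | zero => simp [pvWhileB]
    | succ f => simp [pvWhileB]
  | succ m ih =>
    intro f s hf hd
    obtain ⟨f, rfl⟩ : ∃ f', f = f' + 1 := ⟨f - 1, by omega⟩
    have hne : (s.1 + d.1, s.2 + d.2) ≠
        (s.1 + (((m : Nat) : Int) + 1 + 1) * d.1, s.2 + (((m : Nat) : Int) + 1 + 1) * d.2) := by
      intro hEq
      have h1 : s.1 + d.1 = s.1 + (((m : Nat) : Int) + 1 + 1) * d.1 := congrArg Prod.fst hEq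
      have h2 : s.2 + d.2 = s.2 + (((m : Nat) : Int) + 1 + 1) * d.2 := congrArg Prod.snd hEq
      have hd1 : d.1 = 0 := by
        by_contra hd1
        have hpos : (((m : Nat) : Int) + 1) * d.1 ≠ 0 := mul_ne_zero (by positivity) hd1
        have hx : (((m : Nat) : Int) + 1 + 1) * d.1 = d.1 + (((m : Nat) : Int) + 1) * d.1 := by ring
        omega
      have hd2 : d.2 = 0 := by
        by_contra hd2
        have hpos : (((m : Nat) : Int) + 1) * d.2 ≠ 0 := mul_ne_zero (by positivity) hd2
        have hx : (((m : Nat) : Int) + 1 + 1) * d.2 = d.2 + (((m : Nat) : Int) + 1) * d.2 := by ring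
        omega
      exact hd (Prod.ext hd1 hd2)
    have step := ih f (s.1 + d.1, s.2 + d.2) (by omega) hd
    simp only [pvWhileB]
    push_cast
    rw [if_neg hne]
    have harg1 : s.1 + (((m : Nat) : Int) + 1 + 1) * d.1 = (s.1 + d.1) + (((m : Nat) : Int) + 1) * d.1 := by ring
    have harg2 : s.2 + (((m : Nat) : Int) + 1 + 1) * d.2 = (s.2 + d.2) + (((m : Nat) : Int) + 1) * d.2 := by ring
    rw [harg1, harg2, step]
    rw [List.range_succ_eq_map, List.map_cons, List.map_map]
    refine congrArg₂ List.cons (by norm_num) (List.map_congr_left fun k _ => ?_)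
    simp only [Function.comp_apply, Prod.mk.injEq]
    refine ⟨by push_cast; ring, by push_cast; ring⟩

-- what A's inner while loop emits between two aligned points (k = 1 .. n)
def pvSegList (a b : Int × Int) : List (Int × Int) :=
  (List.range (max (b.1 - a.1).natAbs (b.2 - a.2).natAbs)).map
    (fun (k : Nat) => (a.1 + ((k : Int) + 1) * pvSgn (b.1 - a.1), a.2 + ((k : Int) + 1) * pvSgn (b.2 - a.2)))

-- what A's closing while loop emits (k = 1 .. n-1, one short of the target)
def pvCloseList (a b : Int × Int) : List (Int × Int) :=
  (List.range (max (b.1 - a.1).natAbs (b.2 - a.2).natAbs - 1)).map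
    (fun (k : Nat) => (a.1 + ((k : Int) + 1) * pvSgn (b.1 - a.1), a.2 + ((k : Int) + 1) * pvSgn (b.2 - a.2)))

-- B's half-open run [a, b) written with the sign vector (k = 0 .. n-1)
def pvHalf (a b : Int × Int) : List (Int × Int) :=
  (List.range (max (b.1 - a.1).natAbs (b.2 - a.2).natAbs)).map
    (fun (k : Nat) => (a.1 + (k : Int) * pvSgn (b.1 - a.1), a.2 + (k : Int) * pvSgn (b.2 - a.2)))

theorem pvWhileA_seg {a b : Int × Int} (h : pvAligned a b) :
    pvWhileA b (pvSgn (b.1 - a.1), pvSgn (b.2 - a.2)) (pvFuel b a + 1) a = (pvSegList a b, b) := by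
  have hdec := pvAligned_decomp h
  have hfuel : max (b.1 - a.1).natAbs (b.2 - a.2).natAbs ≤ pvFuel b a + 1 := by
    unfold pvFuel; omega
  have hd : max (b.1 - a.1).natAbs (b.2 - a.2).natAbs ≠ 0 →
      (pvSgn (b.1 - a.1), pvSgn (b.2 - a.2)) ≠ ((0 : Int), (0 : Int)) := by
    intro hcne hEq
    have h1 : pvSgn (b.1 - a.1) = 0 := congrArg Prod.fst hEq
    have h2 : pvSgn (b.2 - a.2) = 0 := congrArg Prod.snd hEq
    rw [pvSgn_eq_zero_iff] at h1 h2
    omega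
  have hmain := pvWhileA_closed (pvSgn (b.1 - a.1), pvSgn (b.2 - a.2))
    (max (b.1 - a.1).natAbs (b.2 - a.2).natAbs) (pvFuel b a + 1) a hfuel hd
  simp only at hmain
  rw [← hdec] at hmain
  rw [hmain, pvSegList]

-- A's point loop produces the flatMap of pvSegList over consecutive edges,
-- and ends at the last input point
theorem pvSegsA_eq (rest : List (Int × Int)) :
    ∀ a : Int × Int, (∀ pq ∈ (a :: rest).zip rest, pvAligned pq.1 pq.2) →
    pvSegsA rest a = (((a :: rest).zip rest).flatMap (fun pq => pvSegList pq.1 pq.2),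
      (a :: rest).getLast (List.cons_ne_nil a rest)) := by
  induction rest with
  | nil => intro a _; simp [pvSegsA]
  | cons b r ih =>
    intro a hchain
    simp only [List.zip_cons_cons] at hchain ⊢
    have hab : pvAligned a b := hchain (a, b) List.mem_cons_self
    have hrec := ih b (fun pq hm => hchain pq (List.mem_cons_of_mem _ hm))
    simp only [pvSegsA, pvWhileA_seg hab, hrec, List.flatMap_cons, Prod.mk.injEq]
    exact ⟨trivial, (List.getLast_cons (List.cons_ne_nil b r)).symm⟩

-- closing segment: A's second while loop equals pvCloseList
theorem pvClose_eq {l p0 : Int × Int} (h : pvAligned l p0) :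
    pvWhileB p0 (pvSgn (p0.1 - l.1), pvSgn (p0.2 - l.2)) (pvFuel p0 l + 1) l = pvCloseList l p0 := by
  have hdec := pvAligned_decomp h
  unfold pvCloseList
  cases hcase : max (p0.1 - l.1).natAbs (p0.2 - l.2).natAbs with
  | zero =>
    have hx : p0.1 - l.1 = 0 := by omega
    have hy : p0.2 - l.2 = 0 := by omega
    have h1 : pvSgn (p0.1 - l.1) = 0 := by rw [pvSgn_eq_zero_iff]; exact hx
    have h2 : pvSgn (p0.2 - l.2) = 0 := by rw [pvSgn_eq_zero_iff]; exact hy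
    have hp0 : p0 = l := by
      obtain ⟨x, y⟩ := p0; obtain ⟨u, v⟩ := l
      simp only [Prod.mk.injEq]
      simp only at hx hy
      omega
    have hstop : pvWhileB p0 (pvSgn (p0.1 - l.1), pvSgn (p0.2 - l.2)) (pvFuel p0 l + 1) l = [] := by
      simp only [pvWhileB, h1, h2]
      rw [if_pos (by simp [hp0])]
    rw [hstop]
    simp
  | succ m =>
    have hd : (pvSgn (p0.1 - l.1), pvSgn (p0.2 - l.2)) ≠ ((0 : Int), (0 : Int)) := by
      intro hEq
      have h1 : pvSgn (p0.1 - l.1) = 0 := congrArg Prod.fst hEq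
      have h2 : pvSgn (p0.2 - l.2) = 0 := congrArg Prod.snd hEq
      rw [pvSgn_eq_zero_iff] at h1 h2
      omega
    have hfuel : m ≤ pvFuel p0 l + 1 := by unfold pvFuel; omega
    have hcl := pvWhileB_closed (pvSgn (p0.1 - l.1), pvSgn (p0.2 - l.2)) m (pvFuel p0 l + 1) l hfuel hd
    simp only at hcl
    have harg : p0 = (l.1 + ((m : Int) + 1) * pvSgn (p0.1 - l.1), l.2 + ((m : Int) + 1) * pvSgn (p0.2 - l.2)) := by
      rw [hcase] at hdec; push_cast at hdec; exact hdec
    rw [← harg] at hcl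
    rw [hcl, Nat.add_sub_cancel]

-- exact division: PySem floordiv of x*N by N (Python's k*(q-p)//n on an aligned edge)
theorem pvFdivCancel (x N : Int) (h : N ≠ 0) : PySem.Int.floordiv (x * N) N = x := by
  simp [PySem.Int.floordiv]
  exact Int.mul_fdiv_cancel x h

-- B's interpolated edge equals the sign-vector half-open run, on aligned edges
theorem pvLerpSeg_eq_half {a b : Int × Int} (h : pvAligned a b) :
    pvLerpSeg a b = pvHalf a b := by
  have hdec := pvAligned_decomp h
  have hb1 : b.1 - a.1 = ((max (b.1 - a.1).natAbs (b.2 - a.2).natAbs : Nat) : Int) * pvSgn (b.1 - a.1) := by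
    have := congrArg Prod.fst hdec; simp only at this; omega
  have hb2 : b.2 - a.2 = ((max (b.1 - a.1).natAbs (b.2 - a.2).natAbs : Nat) : Int) * pvSgn (b.2 - a.2) := by
    have := congrArg Prod.snd hdec; simp only at this; omega
  unfold pvLerpSeg pvHalf
  rw [PySem.List.pyRange_one]
  have htn : (((max (b.1 - a.1).natAbs (b.2 - a.2).natAbs : Nat) : Int) - 0).toNat
      = max (b.1 - a.1).natAbs (b.2 - a.2).natAbs := by omega
  rw [htn, List.map_map]
  by_cases hN : max (b.1 - a.1).natAbs (b.2 - a.2).natAbs = 0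
  · rw [hN]; simp
  · have hnz : ((max (b.1 - a.1).natAbs (b.2 - a.2).natAbs : Nat) : Int) ≠ 0 :=
      Int.natCast_ne_zero.mpr hN
    refine List.map_congr_left fun k _ => ?_
    simp only [Function.comp_apply, Prod.mk.injEq, zero_add]
    constructor
    · have hm : (k : Int) * (b.1 - a.1)
          = ((k : Int) * pvSgn (b.1 - a.1)) * ((max (b.1 - a.1).natAbs (b.2 - a.2).natAbs : Nat) : Int) := by
        conv_lhs => rw [hb1]
        ring
      rw [hm, pvFdivCancel _ _ hnz]
    · have hm : (k : Int) * (b.2 - a.2)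
          = ((k : Int) * pvSgn (b.2 - a.2)) * ((max (b.1 - a.1).natAbs (b.2 - a.2).natAbs : Nat) : Int) := by
        conv_lhs => rw [hb2]
        ring
      rw [hm, pvFdivCancel _ _ hnz]

-- degenerate edge: everything is empty
theorem pvSegList_self (a : Int × Int) : pvSegList a a = [] := by
  simp [pvSegList]

theorem pvHalf_self (a : Int × Int) : pvHalf a a = [] := by
  simp [pvHalf]

theorem pvCloseList_self (a : Int × Int) : pvCloseList a a = [] := by
  simp [pvCloseList]

-- map over range(n+1) shifted by one position
theorem pvRangeShift {X : Type} (n : Nat) (g : Nat → X) :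
    (List.range (n + 1)).map g ++ [g (n + 1)] = g 0 :: (List.range (n + 1)).map (fun k => g (k + 1)) := by
  have h1 : (List.range (n + 1 + 1)).map g = (List.range (n + 1)).map g ++ [g (n + 1)] := by
    rw [List.range_succ, List.map_append, List.map_singleton]
  have h2 : (List.range (n + 1 + 1)).map g = g 0 :: (List.range (n + 1)).map (fun k => g (k + 1)) := by
    rw [List.range_succ_eq_map, List.map_cons, List.map_map]
    simp [Function.comp_def]
  rw [← h1, h2]

-- the one-vertex shift: a half-open run plus its endpoint is the vertex plus A's run
theorem pvHalf_shift {a b : Int × Int} (h : pvAligned a b) :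
    pvHalf a b ++ [b] = a :: pvSegList a b := by
  have hdec := pvAligned_decomp h
  unfold pvHalf pvSegList
  cases hcase : max (b.1 - a.1).natAbs (b.2 - a.2).natAbs with
  | zero =>
    have hb : b = a := by
      rw [hcase] at hdec; obtain ⟨x, y⟩ := a; obtain ⟨u, v⟩ := b
      simpa using hdec
    simp [hb]
  | succ m =>
    rw [hcase] at hdec
    have key := pvRangeShift m
      (fun k : Nat => (a.1 + (k : Int) * pvSgn (b.1 - a.1), a.2 + (k : Int) * pvSgn (b.2 - a.2)))
    simp only [Nat.cast_zero, zero_mul, add_zero, Nat.cast_add, Nat.cast_one, Prod.mk.eta] at key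
    have hb : (a.1 + ((m : Int) + 1) * pvSgn (b.1 - a.1), a.2 + ((m : Int) + 1) * pvSgn (b.2 - a.2)) = b := by
      conv_rhs => rw [hdec]
      push_cast; rfl
    rw [hb] at key
    exact key

-- a nondegenerate half-open run starts with its vertex
theorem pvHalf_cons {a b : Int × Int} (h : pvAligned a b) (hne : a ≠ b) :
    pvHalf a b = a :: pvCloseList a b := by
  have hdec := pvAligned_decomp h
  unfold pvHalf pvCloseList
  cases hcase : max (b.1 - a.1).natAbs (b.2 - a.2).natAbs with
  | zero =>
    exfalso
    apply hne
    rw [hcase] at hdec; obtain ⟨x, y⟩ := a; obtain ⟨u, v⟩ := b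
    simpa using hdec.symm
  | succ m =>
    rw [List.range_succ_eq_map, List.map_cons, List.map_map, Nat.add_sub_cancel]
    refine congrArg₂ List.cons (by simp) ?_
    refine List.map_congr_left fun k _ => ?_
    simp only [Function.comp_apply, Prod.mk.injEq]
    constructor <;> · push_cast; ring

-- telescoping the shift along the chain of edges
theorem pvTelescope (rest : List (Int × Int)) :
    ∀ a : Int × Int, (∀ pq ∈ (a :: rest).zip rest, pvAligned pq.1 pq.2) →
    ((a :: rest).zip rest).flatMap (fun pq => pvHalf pq.1 pq.2) ++
        [(a :: rest).getLast (List.cons_ne_nil a rest)]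
      = a :: ((a :: rest).zip rest).flatMap (fun pq => pvSegList pq.1 pq.2) := by
  induction rest with
  | nil => intro a _; simp
  | cons b r ih =>
    intro a hchain
    simp only [List.zip_cons_cons, List.flatMap_cons] at hchain ⊢
    have hab : pvAligned a b := hchain (a, b) List.mem_cons_self
    have hrec := ih b (fun pq hm => hchain pq (List.mem_cons_of_mem _ hm))
    rw [List.getLast_cons (List.cons_ne_nil b r), List.append_assoc, hrec,
      ← List.cons_append, ← pvHalf_shift hab, List.append_assoc]
    simp

-- the cyclic zip splits into the chain zip plus the wrap edge
theorem pvZipCyc (z : Int × Int) (rest : List (Int × Int)) :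
    ∀ a : Int × Int, (a :: rest).zip (rest ++ [z])
      = (a :: rest).zip rest ++ [((a :: rest).getLast (List.cons_ne_nil a rest), z)] := by
  induction rest with
  | nil => intro a; simp
  | cons b r ih =>
    intro a
    simp only [List.cons_append, List.zip_cons_cons, ih b,
      List.getLast_cons (List.cons_ne_nil b r)]

-- if every consecutive pair coincides, all points equal the head
theorem pvChain_const (rest : List (Int × Int)) :
    ∀ a : Int × Int, (∀ pq ∈ (a :: rest).zip rest, pq.1 = pq.2) →
    ∀ p ∈ a :: rest, p = a := by
  induction rest with
  | nil => intro a _ p hp; simpa using hp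
  | cons b r ih =>
    intro a hc p hp
    simp only [List.zip_cons_cons] at hc
    have hab : a = b := hc (a, b) List.mem_cons_self
    rcases List.mem_cons.mp hp with rfl | hp
    · rfl
    · rw [hab]; exact ih b (fun pq hm => hc pq (List.mem_cons_of_mem _ hm)) p hp

-- ===== VERDICT (by name: the statements are the Claim_ definitions above) =====
-- shared computation of both sides for a nonempty aligned contour
theorem pvBfold_eq (p0 : Int × Int) (rest : List (Int × Int))
    (hchain : ∀ pq ∈ (p0 :: rest).zip rest, pvAligned pq.1 pq.2)
    (hwrap : pvAligned ((p0 :: rest).getLast (List.cons_ne_nil p0 rest)) p0) :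
    ((p0 :: rest).zip (rest ++ [p0])).foldl (fun acc pq => acc ++ pvLerpSeg pq.1 pq.2) []
      = ((p0 :: rest).zip rest).flatMap (fun pq => pvHalf pq.1 pq.2)
          ++ pvHalf ((p0 :: rest).getLast (List.cons_ne_nil p0 rest)) p0 := by
  rw [PySem.List.foldl_append_eq_flatMap, List.nil_append, pvZipCyc p0 rest p0,
    List.flatMap_append, List.flatMap_cons, List.flatMap_nil, List.append_nil]
  rw [pvLerpSeg_eq_half hwrap]
  exact congrArg₂ (· ++ ·)
    (List.flatMap_congr (fun pq hm => pvLerpSeg_eq_half (hchain pq hm))) rfl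

theorem make_full_contour_spec : Claim_unchanged_make_full_contour := by
  intro points _hdom hpre hnd
  obtain ⟨hne, hchain, hwrap⟩ := hpre
  obtain ⟨p0, rest, rfl⟩ := List.exists_cons_of_ne_nil hne
  simp only [List.tail_cons] at hchain
  have hlastD : (p0 :: rest).getLastD (0, 0) = (p0 :: rest).getLast (List.cons_ne_nil p0 rest) := by
    simp [List.getLastD_eq_getLast?, List.getLast?_eq_some_getLast]
  rw [hlastD, List.headD_cons] at hwrap
  simp only [make_full_contour, make_full_contour_alt]
  rw [pvSegsA_eq rest p0 hchain, pvClose_eq hwrap, pvBfold_eq p0 rest hchain hwrap]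
  by_cases hlp : (p0 :: rest).getLast (List.cons_ne_nil p0 rest) = p0
  case neg =>
    have hhc := pvHalf_cons hwrap hlp
    have hful : ((p0 :: rest).zip rest).flatMap (fun pq => pvHalf pq.1 pq.2)
        ++ pvHalf ((p0 :: rest).getLast (List.cons_ne_nil p0 rest)) p0 ≠ [] := by
      rw [hhc]; simp
    rw [if_neg hful, hhc, ← pvTelescope rest p0 hchain]
    simp
  case pos =>
    have hall : ∀ p ∈ p0 :: rest, p = p0 := by
      by_contra hno
      exact hnd ⟨by rw [hlastD, List.headD_cons, hlp], by simpa using hno⟩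
    have hz : ∀ pq ∈ (p0 :: rest).zip rest, pq.1 = pq.2 := by
      intro pq hm
      obtain ⟨h1, h2⟩ := List.of_mem_zip hm
      rw [hall pq.1 h1, hall pq.2 (List.mem_cons_of_mem _ h2)]
    have hS : ((p0 :: rest).zip rest).flatMap (fun pq => pvSegList pq.1 pq.2) = [] := by
      rw [List.flatMap_eq_nil_iff]
      intro pq hm; rw [hz pq hm]; exact pvSegList_self pq.2
    have hH : ((p0 :: rest).zip rest).flatMap (fun pq => pvHalf pq.1 pq.2) = [] := by
      rw [List.flatMap_eq_nil_iff]
      intro pq hm; rw [hz pq hm]; exact pvHalf_self pq.2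
    rw [hS, hH, hlp, pvCloseList_self, pvHalf_self]
    simp

theorem make_full_contour_tight_core (p0 : Int × Int) (rest : List (Int × Int))
    (hchain : ∀ pq ∈ (p0 :: rest).zip rest, pvAligned pq.1 pq.2)
    (hwrap : pvAligned ((p0 :: rest).getLast (List.cons_ne_nil p0 rest)) p0)
    (hlp : (p0 :: rest).getLast (List.cons_ne_nil p0 rest) = p0)
    (hnall : ¬ ∀ p ∈ p0 :: rest, p = p0) :
    make_full_contour (p0 :: rest) ≠ make_full_contour_alt (p0 :: rest) := by
  have hH : ((p0 :: rest).zip rest).flatMap (fun pq => pvHalf pq.1 pq.2) ≠ [] := by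
    intro hnil
    apply hnall
    apply pvChain_const rest p0
    intro pq hm
    by_contra hpe
    have hhc := pvHalf_cons (hchain pq hm) hpe
    have := (List.flatMap_eq_nil_iff.mp hnil) pq hm
    rw [hhc] at this
    exact List.cons_ne_nil _ _ this
  simp only [make_full_contour, make_full_contour_alt]
  rw [pvSegsA_eq rest p0 hchain, pvClose_eq hwrap, pvBfold_eq p0 rest hchain hwrap,
    hlp, pvCloseList_self, pvHalf_self, List.append_nil, List.append_nil]
  rw [if_neg hH]
  have htel := pvTelescope rest p0 hchain
  rw [hlp] at htel
  rw [← htel]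
  intro hEq
  have := congrArg List.length hEq
  simp at this

theorem make_full_contour_changed : Claim_changed_make_full_contour := by
  unfold Claim_changed_make_full_contour; decide

theorem make_full_contour_tight : Claim_exact_make_full_contour := by
  intro points _hdom hpre hD
  obtain ⟨hne, hchain, hwrap⟩ := hpre
  obtain ⟨hclosed, hnall⟩ := hD
  obtain ⟨p0, rest, rfl⟩ := List.exists_cons_of_ne_nil hne
  simp only [List.tail_cons] at hchain
  have hlastD : (p0 :: rest).getLastD (0, 0) = (p0 :: rest).getLast (List.cons_ne_nil p0 rest) := by
    simp [List.getLastD_eq_getLast?, List.getLast?_eq_some_getLast]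
  rw [hlastD, List.headD_cons] at hwrap hclosed
  rw [List.headD_cons] at hnall
  exact make_full_contour_tight_core p0 rest hchain hwrap hclosed hnall
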